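-- pv_equiv track=rewrite | github.com/DevFest-2022/backend | search.py | _rank_most_liked_users
-- ===== SOURCE A (Python) =====
-- def _rank_most_liked_users(liked_tweets: list[dict]) -> list[str]:
--     user_like_counts = {}
--     for tweet in liked_tweets:
--         author_id = tweet["author_id"]
--         if author_id in user_like_counts:
--             user_like_counts[author_id] += 1
--         else:
--             user_like_counts[author_id] = 1
--
--     sorted_user_like_counts = sorted(
--         user_like_counts.items(),
--         key=lambda item: item[1],
--         reverse=True)
--
--     return [item[0] for item in sorted_user_like_counts]
-- ===== SOURCE B (Python) =====
-- def _rank_most_liked_users(liked_tweets: list[dict]) -> list[str]: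
--     counts = {}
--     for tweet in liked_tweets:
--         author_id = tweet["author_id"]
--         counts[author_id] = counts.get(author_id, 0) + 1
--
--     max_count = max(counts.values(), default=0)
--
--     buckets = {}
--     for author, count in counts.items():
--         buckets.setdefault(count, []).append(author)
--
--     result = []
--     for count in range(max_count, 0, -1):
--         result += buckets.get(count, [])
--     return result
-- ===== Notes on version B (the rewrite author's own statement) =====
-- stated objective: alternative
-- what changed: A sorts the (author, count) items with a stable comparison sort keyed on count (reverse=True); B replaces the sort by a bucket/counting sort: it groups authors by count in a dict of buckets and concatenates buckets from max_count down to 1, preserving first-insertion order within each bucket.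
import Mathlib
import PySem

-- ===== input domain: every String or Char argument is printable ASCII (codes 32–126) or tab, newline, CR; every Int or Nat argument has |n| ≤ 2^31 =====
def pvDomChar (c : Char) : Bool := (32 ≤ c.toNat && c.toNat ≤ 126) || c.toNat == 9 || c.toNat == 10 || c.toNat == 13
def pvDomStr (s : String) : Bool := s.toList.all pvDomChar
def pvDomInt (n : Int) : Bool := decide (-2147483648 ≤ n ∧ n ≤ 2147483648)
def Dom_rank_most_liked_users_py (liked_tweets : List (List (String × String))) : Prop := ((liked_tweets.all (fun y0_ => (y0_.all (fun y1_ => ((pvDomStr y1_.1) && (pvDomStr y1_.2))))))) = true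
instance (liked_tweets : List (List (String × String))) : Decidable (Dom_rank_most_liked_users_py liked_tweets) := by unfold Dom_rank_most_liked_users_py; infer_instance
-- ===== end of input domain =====

-- B replaces A's comparison sort of the count dict by a bucket (counting) sort over counts 1..max_count; equivalence of the return values is proved (neither version mutates its argument).

-- ===== PORT A =====
-- tweet["author_id"]: first-match lookup in the tweet's association list; the default ""
-- is never reached under Pre_ (a missing key is a KeyError, excluded by Pre_).
def pvAuthor (tweet : List (String × String)) : String :=
  PySem.Dict.getD (PySem.Dict.mk tweet) "author_id" ""

def rank_most_liked_users_py (liked_tweets : List (List (String × String))) : List String :=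
  let user_like_counts : PySem.Dict String Int :=
    liked_tweets.foldl (fun d tweet =>
      let author_id := pvAuthor tweet
      if d.contains author_id then
        -- user_like_counts[author_id] += 1 ; the key is present in this branch, so getD reads d[author_id]
        d.insert author_id (d.getD author_id 0 + 1)
      else
        d.insert author_id 1) PySem.Dict.empty
  (PySem.List.sorted user_like_counts.items (fun item => item.2) true).map (fun item => item.1)

-- ===== PORT B =====
def rank_most_liked_users_py_alt (liked_tweets : List (List (String × String))) : List String :=
  let counts : PySem.Dict String Int :=
    liked_tweets.foldl (fun d tweet =>
      let author_id := pvAuthor tweet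
      d.insert author_id (d.getD author_id 0 + 1)) PySem.Dict.empty
  -- max(counts.values(), default=0)
  let max_count : Int := PySem.List.maxD counts.values (fun v => v) 0
  -- buckets.setdefault(count, []).append(author): in-place append = d[k] = d.get(k, []) ++ [author], i.e. Dict.modify
  let buckets : PySem.Dict Int (List String) :=
    counts.items.foldl (fun bs p => bs.modify p.2 [] (fun l => l ++ [p.1])) PySem.Dict.empty
  -- for count in range(max_count, 0, -1): result += buckets.get(count, [])
  (PySem.List.pyRange max_count 0 (-1)).foldl (fun r c => r ++ buckets.getD c []) []

-- ===== PRECONDITION & SPEC =====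
-- Pre_ excludes exactly the inputs where tweet["author_id"] raises KeyError (both A and B raise there).
def Pre_rank_most_liked_users_py (liked_tweets : List (List (String × String))) : Prop :=
  ∀ tweet ∈ liked_tweets, (PySem.Dict.mk tweet).contains "author_id" = true
instance (liked_tweets : List (List (String × String))) : Decidable (Pre_rank_most_liked_users_py liked_tweets) := by unfold Pre_rank_most_liked_users_py; infer_instance

def pvWitness_rank_most_liked_users_py : (List (List (String × String))) :=
  ([[("author_id", "u1")], [("author_id", "u2")], [("author_id", "u1")]])

def Spec_rank_most_liked_users_py (liked_tweets : List (List (String × String))) (out : List String) : Prop := out = rank_most_liked_users_py_alt liked_tweets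
instance (liked_tweets : List (List (String × String))) (out : List String) : Decidable (Spec_rank_most_liked_users_py liked_tweets out) := by unfold Spec_rank_most_liked_users_py; infer_instance

-- ===== CLAIM (what is proved, stated in full; the proofs are below) =====
def Claim_equal_rank_most_liked_users_py : Prop := ∀ (liked_tweets : List (List (String × String))), Dom_rank_most_liked_users_py liked_tweets → Pre_rank_most_liked_users_py liked_tweets → Spec_rank_most_liked_users_py liked_tweets (rank_most_liked_users_py liked_tweets)

-- ===== LEMMAS AND PROOFS =====

-- Both counting loops build Counter(authors), authors = the list of author ids.
theorem pv_countsB_eq (liked_tweets : List (List (String × String))) :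
    liked_tweets.foldl (fun d tweet =>
      d.insert (pvAuthor tweet) (d.getD (pvAuthor tweet) 0 + 1)) PySem.Dict.empty
    = PySem.Dict.counter (liked_tweets.map pvAuthor) := by
  rw [← PySem.Dict.foldl_insert_getD_add_one_eq_counter, List.foldl_map]

theorem pv_countsA_eq (liked_tweets : List (List (String × String))) :
    liked_tweets.foldl (fun d tweet =>
      if d.contains (pvAuthor tweet) then d.insert (pvAuthor tweet) (d.getD (pvAuthor tweet) 0 + 1)
      else d.insert (pvAuthor tweet) 1) PySem.Dict.empty
    = PySem.Dict.counter (liked_tweets.map pvAuthor) := by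
  rw [← pv_countsB_eq]
  refine PySem.List.foldl_congr_mem _ _ _ _ (fun d tweet _ => ?_)
  by_cases h : d.contains (pvAuthor tweet) = true
  · simp [h]
  · simp only [Bool.not_eq_true] at h
    rw [if_neg (by simp [h]), PySem.Dict.getD_of_not_contains _ _ h]
    norm_num

-- insertBy passes over a block it is not inserted before
theorem pv_insertBy_append (p : α → α → Bool) (x : α) (as bs : List α)
    (h : ∀ y ∈ as, p x y = false) :
    PySem.List.insertBy p x (as ++ bs) = as ++ PySem.List.insertBy p x bs := by
  induction as with
  | nil => simp
  | cons a t ih =>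
      simp only [List.cons_append, PySem.List.insertBy, h a (by simp)]
      simp [ih (fun y hy => h y (by simp [hy]))]

theorem pv_sorted_rev_append_singleton {α κ : Type} [LT κ] [DecidableLT κ]
    (L : List α) (x : α) (key : α → κ) :
    PySem.List.sorted (L ++ [x]) key true
      = PySem.List.insertBy (fun a b => decide (key b < key a)) x (PySem.List.sorted L key true) := by
  simp [PySem.List.sorted_rev_eq_foldl_insertBy]

-- stable reverse sort splits off the block of maximal key c
theorem pv_sorted_rev_split (key : α → Int) (c : Int) :
    ∀ (L : List α), (∀ p ∈ L, key p ≤ c) →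
    PySem.List.sorted L key true
      = L.filter (fun p => key p == c)
        ++ PySem.List.sorted (L.filter (fun p => !(key p == c))) key true := by
  intro L
  induction L using List.reverseRecOn with
  | nil => simp
  | append_singleton L x ih =>
      intro h
      have hLle : ∀ p ∈ L, key p ≤ c := fun p hp => h p (by simp [hp])
      rw [pv_sorted_rev_append_singleton, ih hLle]
      by_cases hx : key x = c
      · rw [pv_insertBy_append _ _ _ _ (fun y hy => by
          have : key y = c := by simpa using (List.of_mem_filter hy)
          simp [this, hx])]
        have hcons : PySem.List.insertBy (fun a b => decide (key b < key a)) x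
            (PySem.List.sorted (L.filter (fun p => !(key p == c))) key true)
            = x :: PySem.List.sorted (L.filter (fun p => !(key p == c))) key true := by
          cases hR : PySem.List.sorted (L.filter (fun p => !(key p == c))) key true with
          | nil => simp [PySem.List.insertBy]
          | cons r R =>
              have hr : r ∈ L.filter (fun p => !(key p == c)) := by
                rw [← PySem.List.mem_sorted (key := key) (rev := true), hR]; simp
              have hrc : key r ≤ c ∧ ¬ key r = c := by
                have := List.of_mem_filter hr
                exact ⟨hLle r (List.mem_of_mem_filter hr), by simpa using this⟩
              have : decide (key r < key x) = true := by
                rw [hx]; exact decide_eq_true (lt_of_le_of_ne hrc.1 hrc.2)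
              simp [PySem.List.insertBy, this]
        rw [hcons]
        simp [List.filter_append, hx]
      · have hxc : key x < c := lt_of_le_of_ne (h x (by simp)) hx
        rw [pv_insertBy_append _ _ _ _ (fun y hy => by
          have : key y = c := by simpa using (List.of_mem_filter hy)
          simp [this, not_lt_of_gt hxc])]
        rw [← pv_sorted_rev_append_singleton]
        simp [List.filter_append, hx]

-- stable reverse sort = concatenation of the key buckets, scanned along any strictly
-- decreasing list ds covering all keys
theorem pv_sorted_rev_eq_flatMap (key : α → Int) :
    ∀ (ds : List Int) (L : List α), ds.Pairwise (· > ·) → (∀ p ∈ L, key p ∈ ds) →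
    PySem.List.sorted L key true = ds.flatMap (fun c => L.filter (fun p => key p == c)) := by
  intro ds
  induction ds with
  | nil =>
      intro L _ h
      have : L = [] := by
        cases L with
        | nil => rfl
        | cons a t => exact absurd (h a (by simp)) (by simp)
      simp [this, PySem.List.sorted_eq_nil_iff]
  | cons c ds' ih =>
      intro L hpw h
      have hgt : ∀ c' ∈ ds', c' < c := fun c' hc' => (List.pairwise_cons.mp hpw).1 c' hc'
      have hle : ∀ p ∈ L, key p ≤ c := by
        intro p hp
        rcases List.mem_cons.mp (h p hp) with h' | h'
        · exact le_of_eq h'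
        · exact le_of_lt (hgt _ h')
      rw [pv_sorted_rev_split key c L hle]
      have hmem : ∀ p ∈ L.filter (fun p => !(key p == c)), key p ∈ ds' := by
        intro p hp
        have hne : ¬ key p = c := by simpa using List.of_mem_filter hp
        rcases List.mem_cons.mp (h p (List.mem_of_mem_filter hp)) with h' | h'
        · exact absurd h' hne
        · exact h'
      rw [ih (L.filter (fun p => !(key p == c))) (List.pairwise_cons.mp hpw).2 hmem]
      simp only [List.flatMap_cons]
      congr 1
      refine List.flatMap_congr (fun c' hc' => ?_)
      rw [List.filter_filter]
      refine List.filter_congr (fun p _ => ?_)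
      by_cases hpc : key p = c'
      · simp [hpc, ne_of_lt (hgt _ hc')]
      · simp [hpc]

-- pyRange a b with step 1 is strictly increasing
theorem pv_pyRange_one_pairwise (a b : Int) :
    (PySem.List.pyRange a b).Pairwise (· < ·) := by
  by_cases hab : a < b
  · have hn : (b - a).toNat ≠ 0 := by omega
    generalize hk : (b - a).toNat = k at hn
    induction k generalizing a with
    | zero => omega
    | succ k ihk =>
        rw [PySem.List.pyRange_one_cons hab]
        by_cases h2 : a + 1 < b
        · refine List.pairwise_cons.mpr ⟨?_, ihk (a + 1) h2 (by omega) (by omega)⟩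
          intro x hx
          have := PySem.List.mem_pyRange_one.mp hx
          omega
        · have : PySem.List.pyRange (a + 1) b = [] := PySem.List.pyRange_one_eq_nil (by omega)
          simp [this]
  · rw [PySem.List.pyRange_one_eq_nil (by omega)]
    exact List.Pairwise.nil

theorem pv_pyRange_neg_one_pairwise (m : Int) :
    (PySem.List.pyRange m 0 (-1)).Pairwise (· > ·) := by
  rw [PySem.List.pyRange_neg_one_eq_reverse]
  rw [List.pairwise_reverse]
  exact pv_pyRange_one_pairwise 1 (m + 1)

theorem pv_mem_pyRange_neg_one {m x : Int} (h1 : 0 < x) (h2 : x ≤ m) :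
    x ∈ PySem.List.pyRange m 0 (-1) := by
  rw [PySem.List.pyRange_neg_one_eq_reverse, List.mem_reverse, PySem.List.mem_pyRange_one]
  omega

theorem pv_le_maxD (xs : List Int) (d v : Int) (hv : v ∈ xs) :
    v ≤ PySem.List.maxD xs (fun y => y) d := by
  cases hm : PySem.List.max? xs (fun y => y) with
  | none =>
      rw [PySem.List.max?_eq_none_iff] at hm
      simp [hm] at hv
  | some m =>
      have := PySem.List.max?_isMax hm v hv
      simpa [PySem.List.maxD, hm] using this

-- each bucket read back is the filter of the count items
theorem pv_buckets_getD (L : List (String × Int)) (c : Int) :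
    (L.foldl (fun bs p => bs.modify p.2 [] (fun l => l ++ [p.1])) PySem.Dict.empty).getD c []
      = (L.filter (fun p => p.2 == c)).map (fun p => p.1) := by
  have hswap : L.foldl (fun bs p => bs.modify p.2 [] (fun l => l ++ [p.1])) PySem.Dict.empty
      = (L.map (fun p => (p.2, p.1))).foldl (fun bs q => bs.modify q.1 [] (fun l => l ++ [q.2])) PySem.Dict.empty := by
    rw [List.foldl_map]
  rw [hswap, PySem.Dict.getD_foldl_modify_append]
  simp [PySem.Dict.getD_empty, List.filter_map, List.map_map, Function.comp_def]

-- ===== VERDICT (by name: the statement is the Claim_ definition above) =====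
theorem rank_most_liked_users_py_spec : Claim_equal_rank_most_liked_users_py := by
  intro liked_tweets _ _
  unfold Spec_rank_most_liked_users_py
  simp only [rank_most_liked_users_py, rank_most_liked_users_py_alt]
  rw [pv_countsA_eq, pv_countsB_eq]
  set authors := liked_tweets.map pvAuthor with hauth
  set cnt := PySem.Dict.counter authors with hcnt
  set m := PySem.List.maxD cnt.values (fun v => v) 0 with hm
  rw [PySem.List.foldl_append_eq_flatMap, List.nil_append, pv_sorted_rev_eq_flatMap (fun p => p.2) (PySem.List.pyRange m 0 (-1)) cnt.items (pv_pyRange_neg_one_pairwise m) ?hcov]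
  · rw [List.map_flatMap]
    refine List.flatMap_congr (fun c _ => ?_)
    rw [pv_buckets_getD]
  · intro p hp
    have hval : p.2 ∈ cnt.values := by
      simp only [PySem.Dict.values]
      exact List.mem_map_of_mem hp
    have hub : p.2 ≤ m := pv_le_maxD _ 0 _ hval
    have hpos : 0 < p.2 := by
      rw [hcnt] at hp
      rw [PySem.Dict.items_counter] at hp
      rcases List.mem_map.mp hp with ⟨k, hk, hkp⟩
      have hka : k ∈ authors := (PySem.Set.mem_ofList authors k).mp hk
      have : 0 < authors.count k := List.count_pos_iff.mpr hka
      rw [← hkp]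
      simpa using this
    exact pv_mem_pyRange_neg_one hpos hub
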